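-- pv_equiv track=rewrite | github.com/andrelfuentes/Page-Replacement-Algorithms | optimal.py | SearchOptimalToRemove
-- ===== SOURCE A (Python) =====
-- def SearchOptimalToRemove(MemoryContent, VirtualContent, CurrentIndex):
--     #Copy the contents of VirtualMemoryAccesses (VirtualContent) to a new
--     #list so that it's not altered
--     VirtualContentToAlter = VirtualContent[:]
--     #Remove elements until the CurrentIndex
--     for page in range(CurrentIndex):
--         VirtualContentToAlter.pop(0)
--     #List to hold the upcoming pages
--     ListOfNextPages = []
--     #Variable to hold the furthest index of the possible page of replacement
--     FurthestPageIndex = 0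
--     #Final index of replacement
--     IndexToRemove = 0
--     #Loop to go around the lenght of PhysicalMemory (MemoryContent)
--     for i in range(len(MemoryContent)):
--         #If the page is in the upcoming virtual accesses and not in the list holding them,
--         #append the page and change the CurrentPageIndex
--         if MemoryContent[i] in VirtualContentToAlter and MemoryContent[i] not in ListOfNextPages:
--             ListOfNextPages.append(MemoryContent[i])
--             CurrentPageIndex = VirtualContentToAlter.index(MemoryContent[i])
--             #If the CurrentPageIndex is larger than the current largest,
--             #change FurthestPageIndex and the IndexToRemove becomes the
--             #index of that page
--             if FurthestPageIndex < CurrentPageIndex: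
--                 FurthestPageIndex = CurrentPageIndex
--                 IndexToRemove = MemoryContent.index(VirtualContentToAlter[CurrentPageIndex])
--         #If the page is not in the upcoming virtual memory accesses,
--         #just return that page index
--         elif (MemoryContent[i] not in VirtualContentToAlter):
--             return i
--     #If conditions met, return IndexToRemove
--     return IndexToRemove
-- ===== SOURCE B (Python) =====
-- def SearchOptimalToRemove(MemoryContent, VirtualContent, CurrentIndex):
--     # One forward pass over the future references with a shrinking candidate set
--     future = VirtualContent[max(0, CurrentIndex):]
--     pending = set(MemoryContent)
--     last_seen = None
--     for page in future:
--         if page in pending: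
--             pending.remove(page)
--             last_seen = page
--     if pending:
--         for i, page in enumerate(MemoryContent):
--             if page in pending:
--                 return i
--     if last_seen is None:
--         return 0
--     return MemoryContent.index(last_seen)
-- ===== Notes on version B (the rewrite author's own statement) =====
-- stated objective: faster
-- what changed: A scans the remaining future twice per memory frame (membership test plus list.index); B makes one forward pass over the future that deletes each referenced page from a shrinking candidate set and remembers the last deletion, then answers from the surviving set or that last-seen page.
import Mathlib
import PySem

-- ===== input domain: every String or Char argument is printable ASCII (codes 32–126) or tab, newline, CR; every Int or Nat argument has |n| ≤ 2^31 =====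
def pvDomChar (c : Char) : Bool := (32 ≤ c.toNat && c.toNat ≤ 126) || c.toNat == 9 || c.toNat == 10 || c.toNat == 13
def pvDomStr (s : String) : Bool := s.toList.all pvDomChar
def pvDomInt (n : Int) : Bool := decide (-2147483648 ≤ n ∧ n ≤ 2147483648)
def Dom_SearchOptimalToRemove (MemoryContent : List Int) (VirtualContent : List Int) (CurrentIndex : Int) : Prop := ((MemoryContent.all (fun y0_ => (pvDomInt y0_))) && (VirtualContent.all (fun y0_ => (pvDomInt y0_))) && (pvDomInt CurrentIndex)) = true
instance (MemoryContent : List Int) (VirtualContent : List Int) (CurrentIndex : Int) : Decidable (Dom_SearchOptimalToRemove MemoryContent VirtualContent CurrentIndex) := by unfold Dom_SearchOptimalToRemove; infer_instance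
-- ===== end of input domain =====

-- B replaces A's per-frame scans of the future with ONE forward pass over the future that
-- shrinks a candidate set; equivalence of the RETURN value is proved on Pre_ (A raises
-- IndexError when CurrentIndex exceeds len(VirtualContent)).

-- Python's list.index under a membership guard (total form; guard makes getD unreachable)
def pvIdx (l : List Int) (v : Int) : Nat := (PySem.List.index? l v).getD 0

-- ===== PORT A =====
-- the pop(0) loop 'for page in range(CurrentIndex): VirtualContentToAlter.pop(0)'
def pvPopLoop : Nat → List Int → List Int
  | 0, l => l
  | k + 1, l => pvPopLoop k l.tail

-- the main 'for i in range(len(MemoryContent))' loop with its early return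
def pvALoop (Mem fut : List Int) : List Int → Int → List Int → Int → Int → Int
  | [], _i, _next, _f, ix => ix
  | m :: rs, i, next, f, ix =>
    if m ∈ fut ∧ ¬ m ∈ next then
      if f < ((pvIdx fut m : Nat) : Int) then
        pvALoop Mem fut rs (i + 1) (next ++ [m]) ((pvIdx fut m : Nat) : Int)
          ((pvIdx Mem ((PySem.List.pyGet? fut ((pvIdx fut m : Nat) : Int)).getD m) : Nat) : Int)
      else pvALoop Mem fut rs (i + 1) (next ++ [m]) f ix
    else if ¬ m ∈ fut then i
    else pvALoop Mem fut rs (i + 1) next f ix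

def SearchOptimalToRemove (MemoryContent : List Int) (VirtualContent : List Int) (CurrentIndex : Int) : Int :=
  let VirtualContentToAlter := pvPopLoop CurrentIndex.toNat VirtualContent
  pvALoop MemoryContent VirtualContentToAlter MemoryContent 0 [] 0 0

-- ===== PORT B =====
-- 'for page in future: if page in pending: pending.remove(page); last_seen = page'
def pvBWalk : List Int → PySem.Set Int → Option Int → PySem.Set Int × Option Int
  | [], pend, last => (pend, last)
  | p :: ps, pend, last =>
    if p ∈ pend then pvBWalk ps ((PySem.Set.remove? pend p).getD pend) (some p)
    else pvBWalk ps pend last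

-- 'for i, page in enumerate(MemoryContent): if page in pending: return i'
def pvBScan (pend : PySem.Set Int) : List Int → Int → Option Int
  | [], _ => none
  | m :: rs, i => if m ∈ pend then some i else pvBScan pend rs (i + 1)

def SearchOptimalToRemove_alt (MemoryContent : List Int) (VirtualContent : List Int) (CurrentIndex : Int) : Int :=
  let future := PySem.List.slice VirtualContent (some (max 0 CurrentIndex)) none
  let r := pvBWalk future (PySem.Set.ofList MemoryContent) none
  match (if r.1 ≠ [] then pvBScan r.1 MemoryContent 0 else none) with
  | some i => i
  | none =>
    match r.2 with
    | none => 0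
    | some p => ((pvIdx MemoryContent p : Nat) : Int)

-- ===== PRECONDITION & SPEC =====
-- Pre_ excludes exactly the inputs where A raises IndexError: CurrentIndex > len(VirtualContent)
-- makes A pop from an exhausted list.
def Pre_SearchOptimalToRemove (MemoryContent : List Int) (VirtualContent : List Int) (CurrentIndex : Int) : Prop :=
  CurrentIndex ≤ (VirtualContent.length : Int)
instance (MemoryContent : List Int) (VirtualContent : List Int) (CurrentIndex : Int) : Decidable (Pre_SearchOptimalToRemove MemoryContent VirtualContent CurrentIndex) := by unfold Pre_SearchOptimalToRemove; infer_instance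

def pvWitness_SearchOptimalToRemove : List Int × List Int × Int := ([1, 2], [2, 1, 3], 1)

def Spec_SearchOptimalToRemove (MemoryContent : List Int) (VirtualContent : List Int) (CurrentIndex : Int) (out : Int) : Prop := out = SearchOptimalToRemove_alt MemoryContent VirtualContent CurrentIndex
instance (MemoryContent : List Int) (VirtualContent : List Int) (CurrentIndex : Int) (out : Int) : Decidable (Spec_SearchOptimalToRemove MemoryContent VirtualContent CurrentIndex out) := by unfold Spec_SearchOptimalToRemove; infer_instance

-- ===== CLAIM (what is proved, stated in full; the proofs are below) =====
def Claim_equal_SearchOptimalToRemove : Prop := ∀ (MemoryContent : List Int) (VirtualContent : List Int) (CurrentIndex : Int), Dom_SearchOptimalToRemove MemoryContent VirtualContent CurrentIndex → Pre_SearchOptimalToRemove MemoryContent VirtualContent CurrentIndex → Spec_SearchOptimalToRemove MemoryContent VirtualContent CurrentIndex (SearchOptimalToRemove MemoryContent VirtualContent CurrentIndex)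
-- ===== LEMMAS AND PROOFS =====

theorem pvPopLoop_eq_drop : ∀ (k : Nat) (l : List Int), pvPopLoop k l = l.drop k := by
  intro k
  induction k with
  | zero => intro l; rfl
  | succ k ih =>
    intro l
    show pvPopLoop k l.tail = l.drop (k + 1)
    rw [ih, ← List.drop_one, List.drop_drop, Nat.add_comm]

theorem pvIdx_index? {l : List Int} {v : Int} (h : v ∈ l) :
    PySem.List.index? l v = some (pvIdx l v) := by
  have hs : (PySem.List.index? l v).isSome := (PySem.List.index?_isSome_iff l v).2 h
  cases he : PySem.List.index? l v with
  | none => rw [he] at hs; simp at hs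
  | some k => unfold pvIdx; rw [he]; rfl

theorem pvIdx_getElem? {l : List Int} {v : Int} (h : v ∈ l) :
    l[pvIdx l v]? = some v := by
  obtain ⟨hk, h1, _⟩ := PySem.List.getElem_of_index?_eq_some (pvIdx_index? h)
  rw [List.getElem?_eq_getElem hk, h1]

theorem pvIdx_inj {l : List Int} {p q : Int} (hp : p ∈ l) (hq : q ∈ l)
    (h : pvIdx l p = pvIdx l q) : p = q := by
  have e1 := pvIdx_getElem? hp
  have e2 := pvIdx_getElem? hq
  rw [h] at e1
  rw [e1] at e2
  exact Option.some.inj e2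

theorem pvIdx_cons_self (p : Int) (ps : List Int) : pvIdx (p :: ps) p = 0 := by
  unfold pvIdx
  rw [PySem.List.index?_cons_self]
  rfl

theorem pvIdx_cons_ne {p v : Int} (hne : v ≠ p) {ps : List Int} (hv : v ∈ ps) :
    pvIdx (p :: ps) v = pvIdx ps v + 1 := by
  unfold pvIdx
  rw [PySem.List.index?_cons_of_ne ps (Ne.symm hne), pvIdx_index? hv]
  rfl

-- A's loop, early-return case: some page in rest is not in fut
theorem pvALoop_early (Mem fut : List Int) : ∀ (rest : List Int) (i : Int) next f ix,
    (∃ m ∈ rest, m ∉ fut) →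
    pvALoop Mem fut rest i next f ix
      = i + ((List.findIdx (fun m => decide (m ∉ fut)) rest : Nat) : Int) := by
  intro rest
  induction rest with
  | nil => intro i next f ix h; simp at h
  | cons m rs ih =>
    intro i next f ix h
    by_cases hm : m ∈ fut
    · have hrs : ∃ m ∈ rs, m ∉ fut := by
        rcases h with ⟨x, hx, hxf⟩
        rcases List.mem_cons.1 hx with rfl | hx
        · exact absurd hm hxf
        · exact ⟨x, hx, hxf⟩
      have hfind : List.findIdx (fun m => decide (m ∉ fut)) (m :: rs)
          = List.findIdx (fun m => decide (m ∉ fut)) rs + 1 := by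
        simp [List.findIdx_cons, hm]
      rw [hfind]
      have htail : ∀ next' f' ix', pvALoop Mem fut rs (i + 1) next' f' ix'
          = i + ((List.findIdx (fun m => decide (m ∉ fut)) rs + 1 : Nat) : Int) := by
        intro next' f' ix'
        rw [ih _ _ _ _ hrs]
        push_cast
        ring
      by_cases hn : m ∈ next
      · have hstep : pvALoop Mem fut (m :: rs) i next f ix
            = pvALoop Mem fut rs (i + 1) next f ix := by
          simp [pvALoop, hm, hn]
        rw [hstep, htail]
      · by_cases hcmp : f < ((pvIdx fut m : Nat) : Int)
        · have hstep : pvALoop Mem fut (m :: rs) i next f ix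
              = pvALoop Mem fut rs (i + 1) (next ++ [m]) ((pvIdx fut m : Nat) : Int)
                  ((pvIdx Mem ((PySem.List.pyGet? fut ((pvIdx fut m : Nat) : Int)).getD m) : Nat) : Int) := by
            simp [pvALoop, hm, hn, hcmp]
          rw [hstep, htail]
        · have hstep : pvALoop Mem fut (m :: rs) i next f ix
              = pvALoop Mem fut rs (i + 1) (next ++ [m]) f ix := by
            simp [pvALoop, hm, hn, hcmp]
          rw [hstep, htail]
    · simp [pvALoop, hm, List.findIdx_cons]

-- A's loop, all-in-future case: the state tracks the champion (furthest next use)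
theorem pvALoop_inv (Mem fut : List Int) : ∀ (rest : List Int) (i : Int) next f ix,
    (∀ m ∈ rest, m ∈ fut) →
    (∀ q ∈ next, ((pvIdx fut q : Nat) : Int) ≤ f) →
    ((f = 0 ∧ ix = 0) ∨ ∃ p, p ∈ next ∧ p ∈ fut ∧ ((pvIdx fut p : Nat) : Int) = f
        ∧ ix = ((pvIdx Mem p : Nat) : Int)) →
    ∃ f' : Int,
      (∀ q, (q ∈ next ∨ q ∈ rest) → ((pvIdx fut q : Nat) : Int) ≤ f')
      ∧ ((f' = 0 ∧ pvALoop Mem fut rest i next f ix = 0)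
         ∨ ∃ p, (p ∈ next ∨ p ∈ rest) ∧ p ∈ fut ∧ ((pvIdx fut p : Nat) : Int) = f'
             ∧ pvALoop Mem fut rest i next f ix = ((pvIdx Mem p : Nat) : Int)) := by
  intro rest
  induction rest with
  | nil =>
    intro i next f ix _ hle hst
    refine ⟨f, fun q hq => ?_, ?_⟩
    · rcases hq with hq | hq
      · exact hle q hq
      · simp at hq
    · rcases hst with ⟨h1, h2⟩ | ⟨p, hp, hpf, hpe, hpi⟩
      · exact Or.inl ⟨h1, by simp [pvALoop, h2]⟩
      · exact Or.inr ⟨p, Or.inl hp, hpf, hpe, by simp [pvALoop, hpi]⟩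
  | cons m rs ih =>
    intro i next f ix hall hle hst
    have hm : m ∈ fut := hall m (List.mem_cons_self ..)
    have hall' : ∀ x ∈ rs, x ∈ fut := fun x hx => hall x (List.mem_cons_of_mem _ hx)
    by_cases hn : m ∈ next
    · -- duplicate page: skipped
      have hstep : pvALoop Mem fut (m :: rs) i next f ix
          = pvALoop Mem fut rs (i + 1) next f ix := by
        simp [pvALoop, hm, hn]
      rw [hstep]
      obtain ⟨f', h1, h2⟩ := ih (i + 1) next f ix hall' hle hst
      refine ⟨f', fun q hq => h1 q ?_, ?_⟩
      · rcases hq with hq | hq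
        · exact Or.inl hq
        · rcases List.mem_cons.1 hq with rfl | hq
          · exact Or.inl hn
          · exact Or.inr hq
      · rcases h2 with h2 | ⟨p, hp, h3⟩
        · exact Or.inl h2
        · refine Or.inr ⟨p, ?_, h3⟩
          rcases hp with hp | hp
          · exact Or.inl hp
          · exact Or.inr (List.mem_cons_of_mem _ hp)
    · by_cases hcmp : f < ((pvIdx fut m : Nat) : Int)
      · -- new champion m
        have hstep : pvALoop Mem fut (m :: rs) i next f ix
            = pvALoop Mem fut rs (i + 1) (next ++ [m]) ((pvIdx fut m : Nat) : Int)
                ((pvIdx Mem m : Nat) : Int) := by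
          simp [pvALoop, hm, hn, hcmp]
          rw [pvIdx_getElem? hm]
          rfl
        rw [hstep]
        have hle' : ∀ q ∈ next ++ [m], ((pvIdx fut q : Nat) : Int) ≤ ((pvIdx fut m : Nat) : Int) := by
          intro q hq
          rcases List.mem_append.1 hq with hq | hq
          · exact le_trans (hle q hq) (le_of_lt hcmp)
          · simp at hq; subst hq; exact le_refl _
        have hst' : (((pvIdx fut m : Nat) : Int) = 0 ∧ ((pvIdx Mem m : Nat) : Int) = 0)
            ∨ ∃ p, p ∈ next ++ [m] ∧ p ∈ fut ∧ ((pvIdx fut p : Nat) : Int) = ((pvIdx fut m : Nat) : Int)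
                ∧ ((pvIdx Mem m : Nat) : Int) = ((pvIdx Mem p : Nat) : Int) :=
          Or.inr ⟨m, by simp, hm, rfl, rfl⟩
        obtain ⟨f', h1, h2⟩ := ih (i + 1) (next ++ [m]) _ _ hall' hle' hst'
        refine ⟨f', fun q hq => h1 q ?_, ?_⟩
        · rcases hq with hq | hq
          · exact Or.inl (List.mem_append.2 (Or.inl hq))
          · rcases List.mem_cons.1 hq with rfl | hq
            · exact Or.inl (by simp)
            · exact Or.inr hq
        · rcases h2 with h2 | ⟨p, hp, h3⟩
          · exact Or.inl h2
          · refine Or.inr ⟨p, ?_, h3⟩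
            rcases hp with hp | hp
            · rcases List.mem_append.1 hp with hp | hp
              · exact Or.inl hp
              · simp at hp; subst hp; exact Or.inr (List.mem_cons_self ..)
            · exact Or.inr (List.mem_cons_of_mem _ hp)
      · -- not larger: champion unchanged
        have hstep : pvALoop Mem fut (m :: rs) i next f ix
            = pvALoop Mem fut rs (i + 1) (next ++ [m]) f ix := by
          simp [pvALoop, hm, hn, hcmp]
        rw [hstep]
        have hle' : ∀ q ∈ next ++ [m], ((pvIdx fut q : Nat) : Int) ≤ f := by
          intro q hq
          rcases List.mem_append.1 hq with hq | hq
          · exact hle q hq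
          · simp at hq; subst hq; omega
        have hst' : (f = 0 ∧ ix = 0) ∨ ∃ p, p ∈ next ++ [m] ∧ p ∈ fut ∧ ((pvIdx fut p : Nat) : Int) = f ∧ ix = ((pvIdx Mem p : Nat) : Int) := by
          rcases hst with h | ⟨p, hp, h3⟩
          · exact Or.inl h
          · exact Or.inr ⟨p, List.mem_append.2 (Or.inl hp), h3⟩
        obtain ⟨f', h1, h2⟩ := ih (i + 1) (next ++ [m]) f ix hall' hle' hst'
        refine ⟨f', fun q hq => h1 q ?_, ?_⟩
        · rcases hq with hq | hq
          · exact Or.inl (List.mem_append.2 (Or.inl hq))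
          · rcases List.mem_cons.1 hq with rfl | hq
            · exact Or.inl (by simp)
            · exact Or.inr hq
        · rcases h2 with h2 | ⟨p, hp, h3⟩
          · exact Or.inl h2
          · refine Or.inr ⟨p, ?_, h3⟩
            rcases hp with hp | hp
            · rcases List.mem_append.1 hp with hp | hp
              · exact Or.inl hp
              · simp at hp; subst hp; exact Or.inr (List.mem_cons_self ..)
            · exact Or.inr (List.mem_cons_of_mem _ hp)

-- B's walk: the surviving set and the last removed page (furthest first use)
theorem pvBWalk_inv : ∀ (l : List Int) (pend : PySem.Set Int) (last : Option Int),
    pend.Nodup →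
    ((∀ x, x ∈ (pvBWalk l pend last).1 ↔ (x ∈ pend ∧ x ∉ l))
     ∧ (((pvBWalk l pend last).2 = last ∧ ∀ x ∈ pend, x ∉ l)
        ∨ ∃ p, (pvBWalk l pend last).2 = some p ∧ p ∈ pend ∧ p ∈ l ∧
            ∀ q, q ∈ pend → q ∈ l → q ≠ p → pvIdx l q < pvIdx l p)) := by
  intro l
  induction l with
  | nil =>
    intro pend last _
    constructor
    · intro x; simp [pvBWalk]
    · exact Or.inl ⟨rfl, by simp⟩
  | cons p ps ih =>
    intro pend last hnd
    by_cases hp : p ∈ pend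
    · have hrm : (PySem.Set.remove? pend p).getD pend = pend.discard p := by
        rw [PySem.Set.remove?_of_mem hp]
        rfl
      have hstep : pvBWalk (p :: ps) pend last
          = pvBWalk ps (pend.discard p) (some p) := by
        simp [pvBWalk, hp, hrm]
      have hnd' : (pend.discard p).Nodup := PySem.Set.nodup_discard pend p hnd
      have hmem' : ∀ x, x ∈ pend.discard p ↔ x ∈ pend ∧ x ≠ p :=
        fun x => PySem.Set.mem_discard pend p x
      obtain ⟨h1, h2⟩ := ih (pend.discard p) (some p) hnd'
      constructor
      · intro x
        rw [hstep, h1 x, hmem' x]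
        constructor
        · rintro ⟨⟨hxpend, hxp⟩, hxps⟩
          exact ⟨hxpend, by simp [List.mem_cons, hxp, hxps]⟩
        · rintro ⟨hxpend, hxl⟩
          simp only [List.mem_cons, not_or] at hxl
          exact ⟨⟨hxpend, hxl.1⟩, hxl.2⟩
      · rw [hstep]
        rcases h2 with ⟨he, hno⟩ | ⟨p', he, hp'pend, hp'ps, hmax⟩
        · -- nothing of pend occurs later: p itself is the last page seen
          refine Or.inr ⟨p, he, hp, List.mem_cons_self .., fun q hq hql hqp => ?_⟩
          exfalso
          have hqe : q ∈ pend.discard p := (hmem' q).2 ⟨hq, hqp⟩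
          have hqps : q ∈ ps := by
            rcases List.mem_cons.1 hql with rfl | h
            · exact absurd rfl hqp
            · exact h
          exact hno q hqe hqps
        · have hp'p : p' ≠ p := ((hmem' p').1 hp'pend).2
          refine Or.inr ⟨p', he, ((hmem' p').1 hp'pend).1, List.mem_cons_of_mem _ hp'ps,
            fun q hq hql hqp' => ?_⟩
          rcases List.mem_cons.1 hql with rfl | hqps
          · rw [pvIdx_cons_self, pvIdx_cons_ne hp'p hp'ps]
            omega
          · by_cases hqp : q = p
            · subst hqp
              rw [pvIdx_cons_self, pvIdx_cons_ne hp'p hp'ps]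
              omega
            · have := hmax q ((hmem' q).2 ⟨hq, hqp⟩) hqps hqp'
              rw [pvIdx_cons_ne hqp hqps, pvIdx_cons_ne hp'p hp'ps]
              omega
    · have hstep : pvBWalk (p :: ps) pend last = pvBWalk ps pend last := by
        simp [pvBWalk, hp]
      obtain ⟨h1, h2⟩ := ih pend last hnd
      constructor
      · intro x
        rw [hstep, h1 x]
        constructor
        · rintro ⟨hxpend, hxps⟩
          refine ⟨hxpend, ?_⟩
          simp only [List.mem_cons, not_or]
          exact ⟨fun hxp => hp (hxp ▸ hxpend), hxps⟩
        · rintro ⟨hxpend, hxl⟩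
          simp only [List.mem_cons, not_or] at hxl
          exact ⟨hxpend, hxl.2⟩
      · rw [hstep]
        rcases h2 with ⟨he, hno⟩ | ⟨p', he, hp'pend, hp'ps, hmax⟩
        · refine Or.inl ⟨he, fun x hx => ?_⟩
          simp only [List.mem_cons, not_or]
          exact ⟨fun hxp => hp (hxp ▸ hx), hno x hx⟩
        · have hp'p : p' ≠ p := fun h => hp (h ▸ hp'pend)
          refine Or.inr ⟨p', he, hp'pend, List.mem_cons_of_mem _ hp'ps,
            fun q hq hql hqp' => ?_⟩
          have hqp : q ≠ p := fun h => hp (h ▸ hq)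
          have hqps : q ∈ ps := by
            rcases List.mem_cons.1 hql with rfl | h
            · exact absurd rfl hqp
            · exact h
          have := hmax q hq hqps hqp'
          rw [pvIdx_cons_ne hqp hqps, pvIdx_cons_ne hp'p hp'ps]
          omega

-- B's scan finds the first memory index whose page survives in pend
theorem pvBScan_found (pend : PySem.Set Int) (fut : List Int)
    (hchar : ∀ x, x ∈ pend → x ∉ fut) :
    ∀ (l : List Int) (i : Int), (∀ x ∈ l, x ∉ fut → x ∈ pend) → (∃ m ∈ l, m ∉ fut) →
    pvBScan pend l i = some (i + ((List.findIdx (fun m => decide (m ∉ fut)) l : Nat) : Int)) := by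
  intro l
  induction l with
  | nil => intro i _ h; simp at h
  | cons m rs ih =>
    intro i hsub h
    by_cases hm : m ∈ pend
    · have hmf : m ∉ fut := hchar m hm
      simp [pvBScan, hm, List.findIdx_cons, hmf]
    · have hmf : m ∈ fut := by
        by_contra hmf
        exact hm (hsub m (List.mem_cons_self ..) hmf)
      have hrs : ∃ x ∈ rs, x ∉ fut := by
        rcases h with ⟨x, hx, hxf⟩
        rcases List.mem_cons.1 hx with rfl | hx
        · exact absurd hmf hxf
        · exact ⟨x, hx, hxf⟩
      have hstep : pvBScan pend (m :: rs) i = pvBScan pend rs (i + 1) := by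
        simp [pvBScan, hm]
      rw [hstep, ih (i + 1) (fun x hx => hsub x (List.mem_cons_of_mem _ hx)) hrs]
      have hfind : List.findIdx (fun m => decide (m ∉ fut)) (m :: rs)
          = List.findIdx (fun m => decide (m ∉ fut)) rs + 1 := by
        simp [List.findIdx_cons, hmf]
      rw [hfind]
      congr 1
      push_cast
      ring

-- the common core: both programs agree for any future list
theorem pvCore (Mem fut : List Int) :
    pvALoop Mem fut Mem 0 [] 0 0
      = (match (if (pvBWalk fut (PySem.Set.ofList Mem) none).1 ≠ [] then
            pvBScan (pvBWalk fut (PySem.Set.ofList Mem) none).1 Mem 0 else none) with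
         | some i => i
         | none =>
           match (pvBWalk fut (PySem.Set.ofList Mem) none).2 with
           | none => 0
           | some p => ((pvIdx Mem p : Nat) : Int)) := by
  obtain ⟨h1, h2⟩ := pvBWalk_inv fut (PySem.Set.ofList Mem) none (PySem.Set.nodup_ofList Mem)
  set r := pvBWalk fut (PySem.Set.ofList Mem) none with hr
  by_cases hall : ∀ m ∈ Mem, m ∈ fut
  · -- no early return: the champion decides
    have hempty : r.1 = [] := by
      rw [List.eq_nil_iff_forall_not_mem]
      intro x hx
      obtain ⟨hx1, hx2⟩ := (h1 x).1 hx
      exact hx2 (hall x ((PySem.Set.mem_ofList Mem x).1 hx1))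
    rw [if_neg (by simp [hempty])]
    cases hM : Mem with
    | nil =>
      rw [hM] at h2
      rcases h2 with ⟨he, _⟩ | ⟨p, _, hp, _⟩
      · rw [← hM, he]; simp [hM, pvALoop]
      · rw [PySem.Set.mem_ofList] at hp; simp at hp
    | cons m0 ms =>
      have hm0 : m0 ∈ Mem := by rw [hM]; exact List.mem_cons_self ..
      rcases h2 with ⟨_, hno⟩ | ⟨p', he, hp'pend, hp'fut, hmax⟩
      · exact absurd (hall m0 hm0) (hno m0 ((PySem.Set.mem_ofList Mem m0).2 hm0))
      · rw [← hM, he]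
        have hp'Mem : p' ∈ Mem := (PySem.Set.mem_ofList Mem p').1 hp'pend
        obtain ⟨f', hle, hdisj⟩ := pvALoop_inv Mem fut Mem 0 [] 0 0 hall
          (by simp) (Or.inl ⟨rfl, rfl⟩)
        rcases hdisj with ⟨hf0, hres⟩ | ⟨p, hpmem, hpfut, hpf, hres⟩
        · -- every next use at future index 0: memory holds one distinct page
          rw [hres]
          have hz : ∀ q ∈ Mem, pvIdx fut q = 0 := by
            intro q hq
            have := hle q (Or.inr hq)
            omega
          have hpm0 : p' = m0 := pvIdx_inj hp'fut (hall m0 hm0)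
            (by rw [hz p' hp'Mem, hz m0 hm0])
          rw [hpm0, hM]
          simp [pvIdx_cons_self]
        · have hpMem : p ∈ Mem := by
            rcases hpmem with h | h
            · simp at h
            · exact h
          have hpp' : p = p' := by
            by_contra hne
            have hlt := hmax p ((PySem.Set.mem_ofList Mem p).2 hpMem) hpfut hne
            have := hle p' (Or.inr hp'Mem)
            omega
          rw [hres, hpp']
  · -- some page never used again: first such memory index
    push_neg at hall
    have hnonempty : r.1 ≠ [] := by
      obtain ⟨m, hm, hmf⟩ := hall
      exact List.ne_nil_of_mem ((h1 m).2 ⟨(PySem.Set.mem_ofList Mem m).2 hm, hmf⟩)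
    rw [if_pos hnonempty]
    have hchar : ∀ x, x ∈ r.1 → x ∉ fut := fun x hx => ((h1 x).1 hx).2
    have hsub : ∀ x ∈ Mem, x ∉ fut → x ∈ r.1 := fun x hx hxf =>
      (h1 x).2 ⟨(PySem.Set.mem_ofList Mem x).2 hx, hxf⟩
    rw [pvBScan_found r.1 fut hchar Mem 0 hsub hall]
    rw [pvALoop_early Mem fut Mem 0 [] 0 0 hall]

theorem pvFut_eq (V : List Int) (ci : Int) :
    PySem.List.slice V (some (max 0 ci)) none = pvPopLoop ci.toNat V := by
  rw [pvPopLoop_eq_drop, PySem.List.slice_from V (le_max_left 0 ci)]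
  congr 1
  rcases le_total ci 0 with h | h
  · rw [max_eq_left h]
    simp [Int.toNat_of_nonpos h]
  · rw [max_eq_right h]

-- ===== VERDICT (by name: the statement is the Claim_ definition above) =====
theorem SearchOptimalToRemove_spec : Claim_equal_SearchOptimalToRemove := by
  intro Mem V ci _ _
  show SearchOptimalToRemove Mem V ci = SearchOptimalToRemove_alt Mem V ci
  unfold SearchOptimalToRemove SearchOptimalToRemove_alt
  rw [pvFut_eq]
  exact pvCore Mem (pvPopLoop ci.toNat V)
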